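-- pv_equiv track=rewrite | github.com/tej410831-source/pro | analyzers/syntax_fix_generator.py | _get_expected_base_indent
-- ===== SOURCE A (Python) =====
-- from typing import List, Dict, Optional, Tuple
--
-- def _get_expected_base_indent(full_code: str, region: Dict) -> int:
--     """
--     Calculate the CORRECT base indentation by analyzing where the region
--     sits in the file structure (inside a class, top-level, etc).
--
--     Args:
--         full_code: Complete file source code
--         region: Error region dict with 'start_line'
--
--     Returns:
--         Expected base indentation in spaces
--     """
--     lines = full_code.split('\n')
--     region_start = region['start_line'] - 1  # 0-indexed
--
--     # Scan backwards from region start to find parent block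
--     for i in range(region_start - 1, -1, -1):
--         line = lines[i].rstrip()
--         if not line or line.strip().startswith('#'):
--             continue  # Skip empty and comment lines
--
--         stripped = line.lstrip()
--
--         # Check for class or function definition
--         if (stripped.startswith('class ') or
--             stripped.startswith('def ') or
--             stripped.startswith('template') or  # C++ templates
--             'class ' in stripped):  # Java/C++ classes
--
--             # Found parent - calculate its indent
--             parent_indent = len(line) - len(stripped)
--
--             # Child elements are indented +4 from parent
--             return parent_indent + 4
--
--     # No parent found - this is top-level code
--     return 0
-- ===== SOURCE B (Python) =====
-- def _get_expected_base_indent(full_code: str, region) -> int: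
--     """Forward single pass: the last parent-definition line before the region
--     wins, which equals the first match of a backward scan."""
--     lines = full_code.split('\n')
--     region_start = region['start_line'] - 1  # 0-indexed
--     result = 0
--     for i in range(region_start):
--         line = lines[i].rstrip()
--         if not line or line.strip().startswith('#'):
--             continue
--         stripped = line.lstrip()
--         if (stripped.startswith('class ') or
--                 stripped.startswith('def ') or
--                 stripped.startswith('template') or
--                 'class ' in stripped):
--             result = (len(line) - len(stripped)) + 4
--     return result
-- ===== Notes on version B (the rewrite author's own statement) =====
-- stated objective: alternative
-- what changed: Replaced the backward early-exit scan over earlier lines with a forward single pass that overwrites the result on every parent-definition match, so the last forward match (= first backward match) wins.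
-- outside the precondition, e.g. on _get_expected_base_indent('x', {'start_line': 9}): A raises IndexError, B raises IndexError; on _get_expected_base_indent('x', {}): A raises KeyError, B raises KeyError
import Mathlib
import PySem

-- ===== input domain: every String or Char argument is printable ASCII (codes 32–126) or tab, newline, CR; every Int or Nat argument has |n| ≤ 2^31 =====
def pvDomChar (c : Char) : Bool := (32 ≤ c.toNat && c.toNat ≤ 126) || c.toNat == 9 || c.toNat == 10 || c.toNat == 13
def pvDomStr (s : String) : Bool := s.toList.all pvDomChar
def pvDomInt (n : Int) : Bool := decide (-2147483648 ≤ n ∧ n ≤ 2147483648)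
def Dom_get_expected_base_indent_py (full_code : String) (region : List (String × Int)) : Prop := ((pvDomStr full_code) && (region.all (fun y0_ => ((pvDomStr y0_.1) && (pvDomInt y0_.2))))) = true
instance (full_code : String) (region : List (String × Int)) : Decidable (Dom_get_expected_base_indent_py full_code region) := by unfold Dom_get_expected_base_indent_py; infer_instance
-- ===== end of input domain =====

-- B replaces A's backward early-exit scan with a forward single pass keeping
-- the last matching parent line (same cost, different decomposition).
-- Equivalence is about the return value; neither version mutates its arguments.

-- ===== PORT A =====
-- A's backward loop with early return, as structural recursion over the index list
def pvALoop (lines : List String) : List Int → Int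
  | [] => 0
  | i :: rest =>
    let line := PySem.Str.rstrip ((PySem.List.pyGet? lines i).getD "")
    if line = "" ∨ PySem.Str.startswith (PySem.Str.strip line) "#" = true then
      pvALoop lines rest
    else
      let stripped := PySem.Str.lstrip line
      if PySem.Str.startswith stripped "class " = true ∨
         PySem.Str.startswith stripped "def " = true ∨
         PySem.Str.startswith stripped "template" = true ∨
         PySem.Str.isIn "class " stripped = true then
        (PySem.Str.len line - PySem.Str.len stripped) + 4
      else
        pvALoop lines rest

def get_expected_base_indent_py (full_code : String) (region : List (String × Int)) : Int :=
  let lines := (PySem.Str.split? full_code "\n").getD []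
  let region_start := (PySem.Dict.get? (PySem.Dict.mk region) "start_line").getD 0 - 1
  pvALoop lines (PySem.List.pyRange (region_start - 1) (-1) (-1))

-- ===== PORT B =====
def get_expected_base_indent_py_alt (full_code : String) (region : List (String × Int)) : Int :=
  let lines := (PySem.Str.split? full_code "\n").getD []
  let region_start := (PySem.Dict.get? (PySem.Dict.mk region) "start_line").getD 0 - 1
  (PySem.List.pyRange 0 region_start 1).foldl (fun result i =>
    let line := PySem.Str.rstrip ((PySem.List.pyGet? lines i).getD "")
    if line = "" ∨ PySem.Str.startswith (PySem.Str.strip line) "#" = true then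
      result
    else
      let stripped := PySem.Str.lstrip line
      if PySem.Str.startswith stripped "class " = true ∨
         PySem.Str.startswith stripped "def " = true ∨
         PySem.Str.startswith stripped "template" = true ∨
         PySem.Str.isIn "class " stripped = true then
        (PySem.Str.len line - PySem.Str.len stripped) + 4
      else
        result) 0

-- ===== PRECONDITION & SPEC =====
-- Pre_ excludes only inputs where A raises: a missing 'start_line' key (KeyError)
-- and a start_line pointing past the end of the file (IndexError on lines[region_start-1]).
def Pre_get_expected_base_indent_py (full_code : String) (region : List (String × Int)) : Prop :=
  (PySem.Dict.get? (PySem.Dict.mk region) "start_line").isSome = true ∧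
  (PySem.Dict.get? (PySem.Dict.mk region) "start_line").getD 0 ≤
    (((PySem.Str.split? full_code "\n").getD []).length : Int) + 1
instance (full_code : String) (region : List (String × Int)) : Decidable (Pre_get_expected_base_indent_py full_code region) := by unfold Pre_get_expected_base_indent_py; infer_instance

def pvWitness_get_expected_base_indent_py : String × (List (String × Int)) :=
  ("class A:\n    pass", [("start_line", 2)])

def Spec_get_expected_base_indent_py (full_code : String) (region : List (String × Int)) (out : Int) : Prop := out = get_expected_base_indent_py_alt full_code region
instance (full_code : String) (region : List (String × Int)) (out : Int) : Decidable (Spec_get_expected_base_indent_py full_code region out) := by unfold Spec_get_expected_base_indent_py; infer_instance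

-- ===== CLAIM (what is proved, stated in full; the proofs are below) =====
def Claim_equal_get_expected_base_indent_py : Prop := ∀ (full_code : String) (region : List (String × Int)), Dom_get_expected_base_indent_py full_code region → Pre_get_expected_base_indent_py full_code region → Spec_get_expected_base_indent_py full_code region (get_expected_base_indent_py full_code region)

-- ===== LEMMAS AND PROOFS =====

-- the per-index outcome both loops decide on: none = skip, some v = parent found
def pvHit? (lines : List String) (i : Int) : Option Int :=
  let line := PySem.Str.rstrip ((PySem.List.pyGet? lines i).getD "")
  if line = "" ∨ PySem.Str.startswith (PySem.Str.strip line) "#" = true then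
    none
  else
    let stripped := PySem.Str.lstrip line
    if PySem.Str.startswith stripped "class " = true ∨
       PySem.Str.startswith stripped "def " = true ∨
       PySem.Str.startswith stripped "template" = true ∨
       PySem.Str.isIn "class " stripped = true then
      some ((PySem.Str.len line - PySem.Str.len stripped) + 4)
    else
      none

theorem pvALoop_cons (lines : List String) (i : Int) (rest : List Int) :
    pvALoop lines (i :: rest) =
      match pvHit? lines i with
      | some v => v
      | none => pvALoop lines rest := by
  rw [pvALoop]
  unfold pvHit?
  simp only [pysem]
  split_ifs <;> rfl

theorem pvALoop_eq_findSome? (lines : List String) (l : List Int) :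
    pvALoop lines l = (l.findSome? (pvHit? lines)).getD 0 := by
  induction l with
  | nil => rfl
  | cons i rest ih =>
    rw [pvALoop_cons, List.findSome?_cons]
    cases h : pvHit? lines i <;> simp [ih]

theorem pvBLoop_eq_findSome? (lines : List String) (l : List Int) (acc : Int) :
    l.foldl (fun result i =>
      let line := PySem.Str.rstrip ((PySem.List.pyGet? lines i).getD "")
      if line = "" ∨ PySem.Str.startswith (PySem.Str.strip line) "#" = true then
        result
      else
        let stripped := PySem.Str.lstrip line
        if PySem.Str.startswith stripped "class " = true ∨
           PySem.Str.startswith stripped "def " = true ∨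
           PySem.Str.startswith stripped "template" = true ∨
           PySem.Str.isIn "class " stripped = true then
          (PySem.Str.len line - PySem.Str.len stripped) + 4
        else
          result) acc = (l.reverse.findSome? (pvHit? lines)).getD acc := by
  induction l generalizing acc with
  | nil => rfl
  | cons i rest ih =>
    rw [List.foldl_cons, ih, List.reverse_cons, List.findSome?_append]
    cases hfs : rest.reverse.findSome? (pvHit? lines) with
    | some v => simp
    | none =>
      rw [List.findSome?_cons]
      unfold pvHit?
      simp only [pysem]
      split_ifs <;> rfl

-- ===== VERDICT (by name: the statement is the Claim_ definition above) =====
theorem get_expected_base_indent_py_spec : Claim_equal_get_expected_base_indent_py := by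
  intro full_code region _ _
  unfold Spec_get_expected_base_indent_py get_expected_base_indent_py get_expected_base_indent_py_alt
  rw [pvALoop_eq_findSome?, pvBLoop_eq_findSome?, PySem.List.pyRange_neg_one_eq_reverse]
  norm_num
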